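-- pv_equiv track=rewrite | github.com/mccarvik/poker | app/handlers/run_multi_handler.py | cleanInputs
-- ===== SOURCE A (Python) =====
-- def cleanInputs(args):
--     hands = {}; board = [];
--     for k,v in args.items():
--         if 'holecard' in k:
--             hands[k[:-1]] = []
--         elif 'saved' in k:
--             hands[k[:6]] = []
--
--     for k,v in args.items():
--         if 'holecard' in k:
--             hands[k[:-1]].append((args[k]['val'], args[k]['suit']))
--         elif 'saved' in k:
--             hands[k[:6]].append((args[k]['val'], args[k]['suit']))
--         elif 'board' in k:
--             board.append((args[k]['val'], args[k]['suit']))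
--     return (hands, board)
-- ===== SOURCE B (Python) =====
-- def cleanInputs(args):
--     # classify each key to its hand name (or None), then build the result by
--     # grouping: distinct names in first-occurrence order, each hand list and the
--     # board produced by a filtering comprehension over the items.
--     def hand_name(k):
--         if 'holecard' in k:
--             return k[:-1]
--         if 'saved' in k:
--             return k[:6]
--         return None
--
--     items = list(args.items())
--     names = []
--     for k, v in items:
--         n = hand_name(k)
--         if n is not None and n not in names:
--             names.append(n)
--     hands = {n: [(v['val'], v['suit']) for k, v in items if hand_name(k) == n]
--              for n in names}
--     board = [(v['val'], v['suit']) for k, v in items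
--              if hand_name(k) is None and 'board' in k]
--     return (hands, board)
-- ===== Notes on version B (the rewrite author's own statement) =====
-- stated objective: alternative
-- what changed: Replaced A's incremental two-pass dict building (init empty lists, then append card by card re-looking keys up via args[k]) by a group-by formulation: classify each key once with a hand_name helper, collect the distinct hand names in first-occurrence order, and build each hand list and the board as filtering comprehensions over the items.
import Mathlib
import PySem

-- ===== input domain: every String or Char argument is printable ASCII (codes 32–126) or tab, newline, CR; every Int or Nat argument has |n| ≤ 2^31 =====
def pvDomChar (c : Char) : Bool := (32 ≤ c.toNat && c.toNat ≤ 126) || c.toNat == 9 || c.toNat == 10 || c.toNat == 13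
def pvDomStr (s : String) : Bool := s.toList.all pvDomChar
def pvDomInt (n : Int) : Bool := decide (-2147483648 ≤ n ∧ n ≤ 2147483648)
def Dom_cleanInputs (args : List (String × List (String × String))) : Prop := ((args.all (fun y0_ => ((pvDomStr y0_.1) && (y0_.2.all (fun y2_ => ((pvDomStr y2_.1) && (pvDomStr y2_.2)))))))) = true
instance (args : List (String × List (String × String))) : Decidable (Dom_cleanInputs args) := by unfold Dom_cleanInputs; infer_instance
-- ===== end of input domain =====

-- B replaces A's incremental two-pass dict building by a group-by formulation:
-- classify each key once, collect the distinct hand names in first-occurrence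
-- order, and build each hand list and the board by filtering comprehensions.

-- ===== PORT A =====
-- first loop body: initialise hands[name] = [] for holecard/saved keys
def pvAInit (hands : PySem.Dict String (List (String × String)))
    (kv : String × List (String × String)) : PySem.Dict String (List (String × String)) :=
  if PySem.Str.isIn "holecard" kv.1 then hands.insert (PySem.Str.slice kv.1 none (some (-1))) []
  else if PySem.Str.isIn "saved" kv.1 then hands.insert (PySem.Str.slice kv.1 none (some 6)) []
  else hands

-- second loop body: A re-looks the key up via args[k] and appends (args[k]['val'], args[k]['suit'])
def pvAFill (args : List (String × List (String × String)))
    (st : PySem.Dict String (List (String × String)) × List (String × String))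
    (kv : String × List (String × String)) :
    PySem.Dict String (List (String × String)) × List (String × String) :=
  if PySem.Str.isIn "holecard" kv.1 then
    (st.1.insert (PySem.Str.slice kv.1 none (some (-1)))
      (st.1.getD (PySem.Str.slice kv.1 none (some (-1))) [] ++
        [((PySem.Dict.mk ((PySem.Dict.mk args).getD kv.1 [])).getD "val" "",
          (PySem.Dict.mk ((PySem.Dict.mk args).getD kv.1 [])).getD "suit" "")]), st.2)
  else if PySem.Str.isIn "saved" kv.1 then
    (st.1.insert (PySem.Str.slice kv.1 none (some 6))
      (st.1.getD (PySem.Str.slice kv.1 none (some 6)) [] ++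
        [((PySem.Dict.mk ((PySem.Dict.mk args).getD kv.1 [])).getD "val" "",
          (PySem.Dict.mk ((PySem.Dict.mk args).getD kv.1 [])).getD "suit" "")]), st.2)
  else if PySem.Str.isIn "board" kv.1 then
    (st.1, st.2 ++ [((PySem.Dict.mk ((PySem.Dict.mk args).getD kv.1 [])).getD "val" "",
                     (PySem.Dict.mk ((PySem.Dict.mk args).getD kv.1 [])).getD "suit" "")])
  else st

def cleanInputs (args : List (String × List (String × String))) : (List (String × List (String × String))) × (List (String × String)) :=
  let hands := args.foldl pvAInit (PySem.Dict.mk [])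
  let st := args.foldl (pvAFill args) (hands, [])
  (st.1.items, st.2)

-- ===== PORT B =====
-- hand_name(k): the hand a key belongs to, or None
def pvHandName (k : String) : Option String :=
  if PySem.Str.isIn "holecard" k then some (PySem.Str.slice k none (some (-1)))
  else if PySem.Str.isIn "saved" k then some (PySem.Str.slice k none (some 6))
  else none

-- (v['val'], v['suit'])
def pvCardB (v : List (String × String)) : String × String :=
  ((PySem.Dict.mk v).getD "val" "", (PySem.Dict.mk v).getD "suit" "")

def cleanInputs_alt (args : List (String × List (String × String))) : (List (String × List (String × String))) × (List (String × String)) :=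
  -- names: distinct hand names in first-occurrence order
  let names := args.foldl (fun ns kv =>
      match pvHandName kv.1 with
      | some n => if ns.contains n then ns else ns ++ [n]
      | none => ns) ([] : List String)
  -- hands: dict comprehension {n: [card for items if hand_name == n] for n in names}
  let hands := names.map (fun n =>
      (n, (args.filter (fun kv => pvHandName kv.1 == some n)).map (fun kv => pvCardB kv.2)))
  -- board: [card for items if hand_name is None and 'board' in k]
  let board := (args.filter (fun kv => (pvHandName kv.1).isNone && PySem.Str.isIn "board" kv.1)).map
      (fun kv => pvCardB kv.2)
  (hands, board)

-- ===== PRECONDITION & SPEC =====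
-- Pre_ excludes (a) association lists with duplicate outer or inner keys — those do not denote a
-- Python dict at all (a dict literal collapses them), so A is never run on them — and (b) inputs
-- where a holecard/saved/board entry lacks a 'val' or 'suit' key, on which A raises KeyError.
def Pre_cleanInputs (args : List (String × List (String × String))) : Prop :=
  (args.map Prod.fst).Nodup ∧
  (args.all (fun kv =>
     decide (kv.2.map Prod.fst).Nodup &&
     (!(PySem.Str.isIn "holecard" kv.1 || PySem.Str.isIn "saved" kv.1 || PySem.Str.isIn "board" kv.1) ||
      ((PySem.Dict.mk kv.2).contains "val" && (PySem.Dict.mk kv.2).contains "suit")))) = true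
instance (args : List (String × List (String × String))) : Decidable (Pre_cleanInputs args) := by unfold Pre_cleanInputs; infer_instance

def pvWitness_cleanInputs : (List (String × List (String × String))) :=
  [("holecard1", [("val", "A"), ("suit", "s")]), ("board1", [("val", "2"), ("suit", "h")])]

def Spec_cleanInputs (args : List (String × List (String × String))) (out : (List (String × List (String × String))) × (List (String × String))) : Prop := out = cleanInputs_alt args
instance (args : List (String × List (String × String))) (out : (List (String × List (String × String))) × (List (String × String))) : Decidable (Spec_cleanInputs args out) := by unfold Spec_cleanInputs; infer_instance

-- ===== CLAIM (what is proved, stated in full; the proofs are below) =====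
def Claim_equal_cleanInputs : Prop := ∀ (args : List (String × List (String × String))), Dom_cleanInputs args → Pre_cleanInputs args → Spec_cleanInputs args (cleanInputs args)

-- ===== LEMMAS AND PROOFS =====

-- proof-only helpers
-- (hand name, card) for holecard/saved keys, none otherwise
def pvTag (kv : String × List (String × String)) : Option (String × (String × String)) :=
  match pvHandName kv.1 with
  | some n => some (n, pvCardB kv.2)
  | none => none

def pvBoardRow (kv : String × List (String × String)) : Option (String × String) :=
  if (pvHandName kv.1).isNone && PySem.Str.isIn "board" kv.1 then some (pvCardB kv.2) else none

def pvIm (mm : List (String × (String × String)))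
    (d : PySem.Dict String (List (String × String))) : PySem.Dict String (List (String × String)) :=
  mm.foldl (fun d p => d.insert p.1 []) d

def pvGm (mm : List (String × (String × String)))
    (d : PySem.Dict String (List (String × String))) : PySem.Dict String (List (String × String)) :=
  mm.foldl (fun d p => d.modify p.1 [] (· ++ [p.2])) d

-- the single-pass fold both ports reduce to
def pvStep (st : PySem.Dict String (List (String × String)) × List (String × String))
    (kv : String × List (String × String)) :
    PySem.Dict String (List (String × String)) × List (String × String) :=
  if PySem.Str.isIn "holecard" kv.1 then
    (st.1.modify (PySem.Str.slice kv.1 none (some (-1))) [] (· ++ [pvCardB kv.2]), st.2)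
  else if PySem.Str.isIn "saved" kv.1 then
    (st.1.modify (PySem.Str.slice kv.1 none (some 6)) [] (· ++ [pvCardB kv.2]), st.2)
  else if PySem.Str.isIn "board" kv.1 then
    (st.1, st.2 ++ [pvCardB kv.2])
  else st

-- under nodup outer keys, args[k] = v for (k, v) ∈ args
lemma pv_lookup_eq {args : List (String × List (String × String))}
    (hnd : (args.map Prod.fst).Nodup) {kv : String × List (String × String)} (hm : kv ∈ args) :
    (PySem.Dict.mk args).getD kv.1 [] = kv.2 := by
  apply PySem.Dict.getD_of_get?_eq_some
  apply PySem.Dict.get?_of_mem_items (d := PySem.Dict.mk args) (k := kv.1) (v := kv.2)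
  · exact hm
  · simpa [PySem.Dict.keys_mk] using hnd

-- A's fill step equals the single-pass step, given the args[k] = v rewrite
lemma pv_fill_eq_step {args : List (String × List (String × String))}
    (hnd : (args.map Prod.fst).Nodup) (st : PySem.Dict String (List (String × String)) × List (String × String))
    {kv : String × List (String × String)} (hm : kv ∈ args) :
    pvAFill args st kv = pvStep st kv := by
  simp only [pvAFill, pvStep, pvCardB, PySem.Dict.modify, pv_lookup_eq hnd hm]

-- the single-pass fold splits into the dict fold and the board list
lemma pv_fold_split (l : List (String × List (String × String)))
    (d : PySem.Dict String (List (String × String))) (b : List (String × String)) :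
    l.foldl pvStep (d, b) = (pvGm (l.filterMap pvTag) d, b ++ l.filterMap pvBoardRow) := by
  induction l generalizing d b with
  | nil => simp [pvGm]
  | cons kv l ih =>
    by_cases h1 : PySem.Str.isIn "holecard" kv.1 = true
    · simp only [List.foldl_cons, List.filterMap_cons, pvStep, pvTag, pvBoardRow, pvHandName, h1,
        if_pos, Option.isNone_some, Bool.false_and, pvGm]
      rw [ih]
      rfl
    · by_cases h2 : PySem.Str.isIn "saved" kv.1 = true
      · simp only [List.foldl_cons, List.filterMap_cons, pvStep, pvTag, pvBoardRow, pvHandName, h1,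
          h2, Bool.false_eq_true, if_false, if_true, Option.isNone_some, Bool.false_and, pvGm]
        rw [ih]
        rfl
      · by_cases h3 : PySem.Str.isIn "board" kv.1 = true
        · simp only [List.foldl_cons, List.filterMap_cons, pvStep, pvTag, pvBoardRow, pvHandName,
            h1, h2, h3, Bool.false_eq_true, if_false, if_true, Option.isNone_none, Bool.true_and]
          rw [ih, List.append_assoc]
          rfl
        · simp only [List.foldl_cons, List.filterMap_cons, pvStep, pvTag, pvBoardRow, pvHandName,
            h1, h2, h3, Bool.false_eq_true, if_false, Option.isNone_none, Bool.true_and]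
          exact ih _ _

-- A's init fold is the insert fold over the tagged list
lemma pv_init_eq (l : List (String × List (String × String)))
    (d : PySem.Dict String (List (String × String))) :
    l.foldl pvAInit d = pvIm (l.filterMap pvTag) d := by
  induction l generalizing d with
  | nil => simp [pvIm]
  | cons kv l ih =>
    by_cases h1 : PySem.Str.isIn "holecard" kv.1 = true
    · simp only [List.foldl_cons, List.filterMap_cons, pvAInit, pvTag, pvHandName, h1, if_pos]
      simp only [pvIm, List.foldl_cons]
      exact ih _
    · by_cases h2 : PySem.Str.isIn "saved" kv.1 = true
      · simp only [List.foldl_cons, List.filterMap_cons, pvAInit, pvTag, pvHandName, h1, h2,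
          Bool.false_eq_true, if_false, if_true]
        simp only [pvIm, List.foldl_cons]
        exact ih _
      · simp only [List.foldl_cons, List.filterMap_cons, pvAInit, pvTag, pvHandName, h1, h2,
          Bool.false_eq_true, if_false]
        exact ih _

-- B's names fold is Set.update over the tagged names
lemma pv_names_fold (l : List (String × List (String × String))) (acc : List String) :
    l.foldl (fun ns kv =>
      match pvHandName kv.1 with
      | some n => if ns.contains n then ns else ns ++ [n]
      | none => ns) acc
    = PySem.Set.update acc ((l.filterMap pvTag).map Prod.fst) := by
  induction l generalizing acc with
  | nil => simp [PySem.Set.update]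
  | cons kv l ih =>
    cases h : pvHandName kv.1 with
    | none =>
      simp only [List.foldl_cons, List.filterMap_cons, pvTag, h]
      exact ih acc
    | some n =>
      simp only [List.foldl_cons, List.filterMap_cons, pvTag, h, List.map_cons,
        PySem.Set.update_cons]
      rw [ih]
      have hadd : (if acc.contains n = true then acc else acc ++ [n]) = PySem.Set.add acc n := by
        simp [PySem.Set.add]
      rw [hadd]
      rfl

-- B's per-name filter is the tagged-list filter
lemma pv_filter_eq (l : List (String × List (String × String))) (n : String) :
    (l.filter (fun kv => pvHandName kv.1 == some n)).map (fun kv => pvCardB kv.2)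
    = ((l.filterMap pvTag).filter (fun p => p.1 == n)).map Prod.snd := by
  induction l with
  | nil => rfl
  | cons kv l ih =>
    cases h : pvHandName kv.1 with
    | none => simp only [List.filter_cons, List.filterMap_cons, pvTag, h]; simpa using ih
    | some m =>
      simp only [List.filter_cons, List.filterMap_cons, pvTag, h]
      by_cases hm : m = n
      · subst hm; simpa using congrArg (List.cons (pvCardB kv.2)) ih
      · have : (some m == some n) = false := by simp [hm]
        simp only [this, Bool.false_eq_true, if_false]
        have : (m == n) = false := by simp [hm]
        simpa [this] using ih

-- B's board filter is the filterMap form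
lemma pv_board_eq (l : List (String × List (String × String))) :
    (l.filter (fun kv => (pvHandName kv.1).isNone && PySem.Str.isIn "board" kv.1)).map
      (fun kv => pvCardB kv.2)
    = l.filterMap pvBoardRow := by
  induction l with
  | nil => rfl
  | cons kv l ih =>
    simp only [List.filter_cons, List.filterMap_cons]
    by_cases h : ((pvHandName kv.1).isNone && PySem.Str.isIn "board" kv.1) = true
    · have hb : pvBoardRow kv = some (pvCardB kv.2) := by rw [pvBoardRow, if_pos h]
      simp only [h, if_true, List.map_cons, hb, ih]
    · have hb : pvBoardRow kv = none := by rw [pvBoardRow, if_neg h]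
      simp only [h, Bool.false_eq_true, if_false, hb, ih]

-- Set.update is idempotent
lemma pv_update_idem (s : PySem.Set String) (ks : List String) :
    PySem.Set.update (PySem.Set.update s ks) ks = PySem.Set.update s ks := by
  rw [PySem.Set.update_eq_append_filter (PySem.Set.update s ks) ks]
  have : (PySem.Set.ofList ks).filter (fun y => !(PySem.Set.update s ks).contains y) = [] := by
    rw [List.filter_eq_nil_iff]
    intro y hy
    have hyk : y ∈ ks := (PySem.Set.mem_ofList ks y).mp hy
    have hmem : y ∈ PySem.Set.update s ks := by
      rw [PySem.Set.update_eq_append_filter s ks]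
      by_cases hc : s.contains y = true
      · exact List.mem_append_left _ ((PySem.Set.contains_iff s y).mp hc)
      · refine List.mem_append_right _ ?_
        rw [List.mem_filter]
        have hc' : s.contains y = false := by simpa using hc
        exact ⟨(PySem.Set.mem_ofList ks y).mpr hyk, by rw [hc']; rfl⟩
    simp
    exact fun _ => hyk
  rw [this, List.append_nil]

-- getD of the init fold: untouched keys keep their value
lemma pv_getD_im_not_mem (mm : List (String × (String × String)))
    (d : PySem.Dict String (List (String × String))) (c : String)
    (h : c ∉ mm.map Prod.fst) : (pvIm mm d).getD c [] = d.getD c [] := by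
  induction mm generalizing d with
  | nil => simp [pvIm]
  | cons p mm ih =>
    simp only [List.map_cons, List.mem_cons, not_or] at h
    simp only [pvIm, List.foldl_cons]
    rw [show (mm.foldl (fun d p => d.insert p.1 []) (d.insert p.1 [])) = pvIm mm (d.insert p.1 []) from rfl]
    rw [ih _ h.2, PySem.Dict.getD_insert_of_ne _ _ _ h.1]

-- getD of the init fold: touched keys become []
lemma pv_getD_im_mem (mm : List (String × (String × String)))
    (d : PySem.Dict String (List (String × String))) (c : String)
    (h : c ∈ mm.map Prod.fst) : (pvIm mm d).getD c [] = [] := by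
  induction mm generalizing d with
  | nil => simp at h
  | cons p mm ih =>
    simp only [pvIm, List.foldl_cons]
    rw [show (mm.foldl (fun d p => d.insert p.1 []) (d.insert p.1 [])) = pvIm mm (d.insert p.1 []) from rfl]
    by_cases hm : c ∈ mm.map Prod.fst
    · exact ih _ hm
    · have hc : c = p.1 := by
        simp only [List.map_cons, List.mem_cons] at h
        tauto
      rw [pv_getD_im_not_mem _ _ _ hm, hc, PySem.Dict.getD_insert_self]

-- the core grouping fact: A's filled dict lists exactly the grouped items
lemma pv_items_gm_im (mm : List (String × (String × String))) :
    (pvGm mm (pvIm mm (PySem.Dict.mk []))).items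
    = (PySem.Set.ofList (mm.map Prod.fst)).map
        (fun n => (n, (mm.filter (fun p => p.1 == n)).map Prod.snd)) := by
  have hkeys : (pvGm mm (pvIm mm (PySem.Dict.mk []))).keys = PySem.Set.ofList (mm.map Prod.fst) := by
    rw [show pvGm mm (pvIm mm (PySem.Dict.mk [])) = mm.foldl (fun d p => d.modify p.1 [] (· ++ [p.2])) (pvIm mm (PySem.Dict.mk [])) from rfl]
    rw [PySem.Dict.keys_foldl_modify_key]
    rw [show pvIm mm (PySem.Dict.mk []) = mm.foldl (fun d p => d.insert p.1 []) (PySem.Dict.mk []) from rfl]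
    rw [PySem.Dict.keys_foldl_insert_key]
    exact pv_update_idem [] (mm.map Prod.fst)
  have hnd : (pvGm mm (pvIm mm (PySem.Dict.mk []))).keys.Nodup := by
    rw [hkeys]; exact PySem.Set.nodup_ofList _
  rw [PySem.Dict.items_eq_map_keys _ hnd []]
  rw [hkeys]
  apply List.map_congr_left
  intro n hn
  have hmem : n ∈ mm.map Prod.fst := (PySem.Set.mem_ofList _ _).mp hn
  congr 1
  rw [show pvGm mm (pvIm mm (PySem.Dict.mk [])) = mm.foldl (fun d p => d.modify p.1 [] (· ++ [p.2])) (pvIm mm (PySem.Dict.mk [])) from rfl]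
  rw [PySem.Dict.getD_foldl_modify_append]
  rw [pv_getD_im_mem _ _ _ hmem, List.nil_append]

-- ===== VERDICT (by name: the statement is the Claim_ definition above) =====
theorem cleanInputs_spec : Claim_equal_cleanInputs := by
  intro args _ hpre
  obtain ⟨hnd, _⟩ := hpre
  show ((args.foldl (pvAFill args) ((args.foldl pvAInit (PySem.Dict.mk [])), [])).1.items,
        (args.foldl (pvAFill args) ((args.foldl pvAInit (PySem.Dict.mk [])), [])).2) =
       cleanInputs_alt args
  rw [PySem.List.foldl_congr_mem args (pvAFill args) pvStep _ (fun st kv hm => pv_fill_eq_step hnd st hm)]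
  rw [pv_init_eq, pv_fold_split]
  simp only [cleanInputs_alt]
  rw [pv_names_fold, pv_board_eq]
  rw [show PySem.Set.update ([] : PySem.Set String) ((args.filterMap pvTag).map Prod.fst) = PySem.Set.ofList ((args.filterMap pvTag).map Prod.fst) from rfl]
  rw [pv_items_gm_im, List.nil_append]
  congr 1
  apply List.map_congr_left
  intro n _
  rw [pv_filter_eq]
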